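-- pv_equiv track=rewrite | github.com/Quantum-Dynamics-Hub/Libra-X | src/lazy.py | single_excitations
-- ===== SOURCE A (Python) =====
-- def single_excitations(Nmin,Nmax,HOMO,nspin):
--     # form all single excitations from [Nmin,HOMO] to [LUMO,Nmax]
--     # where LUMO = HOMO + 1
--     # nspin - defines if we want all spin orientations(2) or only one(1)
--
--     st = []  # states
--     LUMO = HOMO + 1
--
--     cnt = 0
--     for j in range(LUMO,Nmax+1):
--         for i in range(Nmin,HOMO+1):
--             ex1  = [] # i->j
--             ex2 = []
--             for v in range(Nmin,HOMO+1):
--                 if v==i: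
--                     ex1.append(j)
--                     ex1.append(-i)
--                     ex2.append(-j)
--                     ex2.append(i)
--                 else:
--                     ex1.append(v)
--                     ex1.append(-v)
--                     ex2.append(v)
--                     ex2.append(-v)
--
--             if nspin>=1:
--                 st.append(["SE"+str(cnt),ex1])
--                 cnt = cnt + 1
--             if nspin>=2:
--                 st.append(["SE"+str(cnt),ex2])
--                 cnt = cnt + 1
--
--     return st
-- ===== SOURCE B (Python) =====
-- def single_excitations(Nmin, Nmax, HOMO, nspin):
--     # For each target orbital j, build the ground-state template once and
--     # produce each excited state as a copy with one or two slots overwritten.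
--     occ = range(Nmin, HOMO + 1)         # lazy range object
--     st = []
--     cnt = 0
--     for j in range(HOMO + 1, Nmax + 1):
--         base = [x for v in occ for x in (v, -v)]
--         for k, i in enumerate(occ):
--             if nspin >= 1:
--                 ex1 = base.copy()
--                 ex1[2 * k] = j          # slot 2*k+1 already holds -i
--                 st.append(["SE" + str(cnt), ex1])
--                 cnt += 1
--             if nspin >= 2:
--                 ex2 = base.copy()
--                 ex2[2 * k] = -j
--                 ex2[2 * k + 1] = i
--                 st.append(["SE" + str(cnt), ex2])
--                 cnt += 1
--     return st
-- ===== Notes on version B (the rewrite author's own statement) =====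
-- stated objective: alternative
-- what changed: B builds the ground-state template once per target orbital j and produces each excitation by copying it and overwriting one or two fixed positions, replacing A's inner v-loop that rebuilds both lists element by element for every (j,i) pair.
import Mathlib
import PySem

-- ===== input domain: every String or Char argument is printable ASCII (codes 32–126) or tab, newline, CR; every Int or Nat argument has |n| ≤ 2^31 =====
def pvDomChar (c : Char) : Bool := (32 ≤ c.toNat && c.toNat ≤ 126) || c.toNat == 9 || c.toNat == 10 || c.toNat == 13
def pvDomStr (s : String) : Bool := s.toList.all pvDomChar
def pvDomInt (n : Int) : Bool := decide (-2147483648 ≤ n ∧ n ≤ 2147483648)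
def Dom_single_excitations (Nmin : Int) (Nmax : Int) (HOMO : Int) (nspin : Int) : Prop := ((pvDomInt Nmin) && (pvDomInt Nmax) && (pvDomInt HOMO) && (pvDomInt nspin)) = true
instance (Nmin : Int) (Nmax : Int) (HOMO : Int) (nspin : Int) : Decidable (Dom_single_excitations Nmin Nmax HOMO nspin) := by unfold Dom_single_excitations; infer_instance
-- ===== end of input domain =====

-- B builds the ground-state template once and overwrites two fixed slots per state,
-- instead of A's inner per-element rebuild loop (objective: alternative decomposition).

-- ===== PORT A =====
def single_excitations (Nmin : Int) (Nmax : Int) (HOMO : Int) (nspin : Int) : List (String × List Int) :=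
  let LUMO := HOMO + 1
  let res := (PySem.List.pyRange LUMO (Nmax + 1) 1).foldl
    (fun (sc : List (String × List Int) × Int) j =>
      (PySem.List.pyRange Nmin (HOMO + 1) 1).foldl
        (fun (sc : List (String × List Int) × Int) i =>
          let ex := (PySem.List.pyRange Nmin (HOMO + 1) 1).foldl
            (fun (p : List Int × List Int) v =>
              if v == i then (p.1 ++ [j, -i], p.2 ++ [-j, i])
              else (p.1 ++ [v, -v], p.2 ++ [v, -v])) ([], [])
          let sc := if nspin ≥ 1 then (sc.1 ++ [("SE" ++ PySem.Int.toStr sc.2, ex.1)], sc.2 + 1) else sc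
          let sc := if nspin ≥ 2 then (sc.1 ++ [("SE" ++ PySem.Int.toStr sc.2, ex.2)], sc.2 + 1) else sc
          sc) sc)
    (([], 0) : List (String × List Int) × Int)
  res.1

-- ===== PORT B =====
def single_excitations_alt (Nmin : Int) (Nmax : Int) (HOMO : Int) (nspin : Int) : List (String × List Int) :=
  -- occ = range(Nmin, HOMO+1) is a lazy range object: its element list is inlined at each use
  -- 'ex[2*k] = j' ported as List.set with (2*k).toNat: exact since k ≥ 0 here
  let res := (PySem.List.pyRange (HOMO + 1) (Nmax + 1) 1).foldl
    (fun (sc : List (String × List Int) × Int) j =>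
      let base := (PySem.List.pyRange Nmin (HOMO + 1) 1).flatMap (fun v => [v, -v])
      (PySem.List.enumerate (PySem.List.pyRange Nmin (HOMO + 1) 1)).foldl
        (fun (sc : List (String × List Int) × Int) ki =>
          let k := ki.1
          let i := ki.2
          let sc := if nspin ≥ 1 then
              (sc.1 ++ [("SE" ++ PySem.Int.toStr sc.2, base.set (2 * k).toNat j)], sc.2 + 1)
            else sc
          let sc := if nspin ≥ 2 then
              (sc.1 ++ [("SE" ++ PySem.Int.toStr sc.2, (base.set (2 * k).toNat (-j)).set ((2 * k).toNat + 1) i)], sc.2 + 1)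
            else sc
          sc) sc)
    (([], 0) : List (String × List Int) × Int)
  res.1

-- ===== PRECONDITION & SPEC =====
def Spec_single_excitations (Nmin : Int) (Nmax : Int) (HOMO : Int) (nspin : Int) (out : List (String × List Int)) : Prop := out = single_excitations_alt Nmin Nmax HOMO nspin
instance (Nmin : Int) (Nmax : Int) (HOMO : Int) (nspin : Int) (out : List (String × List Int)) : Decidable (Spec_single_excitations Nmin Nmax HOMO nspin out) := by unfold Spec_single_excitations; infer_instance

-- ===== CLAIM (what is proved, stated in full; the proofs are below) =====
def Claim_equal_single_excitations : Prop := ∀ (Nmin : Int) (Nmax : Int) (HOMO : Int) (nspin : Int), Dom_single_excitations Nmin Nmax HOMO nspin → Spec_single_excitations Nmin Nmax HOMO nspin (single_excitations Nmin Nmax HOMO nspin)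

-- ===== LEMMAS AND PROOFS =====

-- pair-fold splits into two flatMaps
theorem pv_foldl_pair (f g : Int → List Int) : ∀ (l : List Int) (p : List Int × List Int),
    l.foldl (fun p v => (p.1 ++ f v, p.2 ++ g v)) p = (p.1 ++ l.flatMap f, p.2 ++ l.flatMap g) := by
  intro l
  induction l with
  | nil => intro p; simp
  | cons a t ih => intro p; simp [ih, List.append_assoc]

theorem pv_flat_nohit (i : Int) (w : List Int) : ∀ (l : List Int),
    (∀ m (hm : m < l.length), l[m] ≠ i) →
    l.flatMap (fun v => if v = i then w else [v, -v]) = l.flatMap (fun v => [v, -v]) := by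
  intro l
  induction l with
  | nil => intro _; rfl
  | cons a t ih =>
    intro h
    have ha : a ≠ i := h 0 (by simp)
    simp only [List.flatMap_cons, if_neg ha]
    rw [ih (fun m hm => h (m+1) (by simpa using Nat.succ_lt_succ hm))]

theorem pv_flat_ex1 (j : Int) : ∀ (l : List Int) (k : Nat) (i : Int),
    k < l.length → (∀ m (hm : m < l.length), l[m] = i ↔ m = k) →
    l.flatMap (fun v => if v = i then [j, -i] else [v, -v])
      = (l.flatMap (fun v => [v, -v])).set (2 * k) j := by
  intro l
  induction l with
  | nil => intro k i hk; simp at hk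
  | cons a t ih =>
    intro k i hk h
    cases k with
    | zero =>
      have ha : a = i := by have := h 0 (by simp); simpa using this.mpr rfl
      have hno : ∀ m (hm : m < t.length), t[m] ≠ i := by
        intro m hm he
        have := (h (m+1) (by simpa using Nat.succ_lt_succ hm)).mp (by simpa using he)
        omega
      simp only [List.flatMap_cons, if_pos ha, pv_flat_nohit i _ t hno]
      simp [ha]
    | succ k =>
      have ha : a ≠ i := by
        intro he
        have := (h 0 (by simp)).mp (by simpa using he)
        omega
      have h2 : 2 * (k + 1) = 2 * k + 1 + 1 := by ring
      simp only [List.flatMap_cons, if_neg ha, h2]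
      simp only [List.cons_append, List.nil_append, List.set]
      rw [ih k i (by simpa using Nat.lt_of_succ_lt_succ hk)
        (fun m hm => by
          have := h (m+1) (by simpa using Nat.succ_lt_succ hm)
          simpa [Nat.succ_inj] using this)]

theorem pv_flat_ex2 (x y : Int) : ∀ (l : List Int) (k : Nat) (i : Int),
    k < l.length → (∀ m (hm : m < l.length), l[m] = i ↔ m = k) →
    l.flatMap (fun v => if v = i then [x, y] else [v, -v])
      = ((l.flatMap (fun v => [v, -v])).set (2 * k) x).set (2 * k + 1) y := by
  intro l
  induction l with
  | nil => intro k i hk; simp at hk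
  | cons a t ih =>
    intro k i hk h
    cases k with
    | zero =>
      have ha : a = i := by have := h 0 (by simp); simpa using this.mpr rfl
      have hno : ∀ m (hm : m < t.length), t[m] ≠ i := by
        intro m hm he
        have := (h (m+1) (by simpa using Nat.succ_lt_succ hm)).mp (by simpa using he)
        omega
      simp only [List.flatMap_cons, if_pos ha, pv_flat_nohit i _ t hno]
      simp [List.set]
    | succ k =>
      have ha : a ≠ i := by
        intro he
        have := (h 0 (by simp)).mp (by simpa using he)
        omega
      have h2 : 2 * (k + 1) = 2 * k + 1 + 1 := by ring
      simp only [List.flatMap_cons, if_neg ha, h2]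
      simp only [List.cons_append, List.nil_append, List.set]
      rw [ih k i (by simpa using Nat.lt_of_succ_lt_succ hk)
        (fun m hm => by
          have := h (m+1) (by simpa using Nat.succ_lt_succ hm)
          simpa [Nat.succ_inj] using this)]

theorem pv_main (Nmin Nmax HOMO nspin : Int) :
    single_excitations Nmin Nmax HOMO nspin = single_excitations_alt Nmin Nmax HOMO nspin := by
  unfold single_excitations single_excitations_alt
  dsimp only
  apply congrArg Prod.fst
  apply PySem.List.foldl_congr_mem
  intro sc j _
  have hlen : (PySem.List.pyRange Nmin (HOMO + 1) 1).length = ((HOMO + 1) - Nmin).toNat :=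
    PySem.List.length_pyRange_one _ _
  have henum : PySem.List.enumerate (PySem.List.pyRange Nmin (HOMO + 1) 1)
      = (List.range ((HOMO + 1) - Nmin).toNat).map (fun k : Nat => ((k : Int), Nmin + (k : Int))) := by
    apply List.ext_getElem
    · simp [PySem.List.length_enumerate, hlen]
    · intro m h1 h2
      simp only [PySem.List.getElem_enumerate, PySem.List.getElem_pyRange_one, List.getElem_map]
      simp
  rw [henum, PySem.List.pyRange_one Nmin (HOMO + 1)]
  rw [List.foldl_map, List.foldl_map]
  apply PySem.List.foldl_congr_mem
  intro sc' k hk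
  have hkn : k < ((HOMO + 1) - Nmin).toNat := List.mem_range.mp hk
  dsimp only
  have hocck : k < ((List.range ((HOMO + 1) - Nmin).toNat).map (fun k : Nat => Nmin + (k : Int))).length := by
    simpa using hkn
  have hiff : ∀ m (hm : m < ((List.range ((HOMO + 1) - Nmin).toNat).map (fun k : Nat => Nmin + (k : Int))).length),
      ((List.range ((HOMO + 1) - Nmin).toNat).map (fun k : Nat => Nmin + (k : Int)))[m] = Nmin + (k : Int) ↔ m = k := by
    intro m hm
    simp only [List.getElem_map, List.getElem_range]
    omega
  have hfun : (fun (p : List Int × List Int) v =>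
        if v == (Nmin + (k : Int)) then (p.1 ++ [j, -(Nmin + (k : Int))], p.2 ++ [-j, Nmin + (k : Int)])
        else (p.1 ++ [v, -v], p.2 ++ [v, -v]))
      = fun (p : List Int × List Int) v =>
        (p.1 ++ (if v = Nmin + (k : Int) then [j, -(Nmin + (k : Int))] else [v, -v]),
         p.2 ++ (if v = Nmin + (k : Int) then [-j, Nmin + (k : Int)] else [v, -v])) := by
    funext p v
    by_cases h : v = Nmin + (k : Int) <;> simp [h]
  rw [hfun, pv_foldl_pair]
  have ht : (2 * (k : Int)).toNat = 2 * k := by omega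
  rw [pv_flat_ex1 j _ k _ hocck hiff, pv_flat_ex2 (-j) (Nmin + (k : Int)) _ k _ hocck hiff]
  simp [ht]

-- ===== VERDICT (by name: the statement is the Claim_ definition above) =====
theorem single_excitations_spec : Claim_equal_single_excitations := by
  intro Nmin Nmax HOMO nspin _
  exact pv_main Nmin Nmax HOMO nspin
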